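-- pv_equiv track=rewrite | github.com/siri-n-shetty/codeforces-solutions | 2128d-sum-of-lds.py | sum_of_lds_all_subarrays
-- ===== SOURCE A (Python) =====
-- def sum_of_lds_all_subarrays(test_cases):
--     results = []
--     for n, p in test_cases:
--         total = n * (n + 1) // 2  # Each subarray contributes at least 1
--         ans = total
--         for i in range(n - 1):
--             if p[i] > p[i + 1]:
--                 ans += (i + 1) * (n - i - 1)
--         results.append(ans)
--     return results
-- ===== SOURCE B (Python) =====
-- def sum_of_lds_all_subarrays(test_cases):
--     results = []
--     for n, p in test_cases:
--         # Running double prefix sum: acc = sum over descents i < r of (i+1);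
--         # adding acc at every right endpoint r counts each descent once per
--         # endpoint to its right, so no closed-form (i+1)*(n-i-1) weight is needed.
--         ans = n * (n + 1) // 2
--         acc = 0
--         for r in range(1, n):
--             if p[r - 1] > p[r]:
--                 acc += r
--             ans += acc
--         results.append(ans)
--     return results
-- ===== Notes on version B (the rewrite author's own statement) =====
-- stated objective: alternative
-- what changed: Replaces the closed-form combinatorial weight (i+1)*(n-i-1) per descent by a streaming double prefix sum: a running weighted-descent accumulator is added once per right endpoint, so no per-descent multiplication by the span count is needed.
import Mathlib
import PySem

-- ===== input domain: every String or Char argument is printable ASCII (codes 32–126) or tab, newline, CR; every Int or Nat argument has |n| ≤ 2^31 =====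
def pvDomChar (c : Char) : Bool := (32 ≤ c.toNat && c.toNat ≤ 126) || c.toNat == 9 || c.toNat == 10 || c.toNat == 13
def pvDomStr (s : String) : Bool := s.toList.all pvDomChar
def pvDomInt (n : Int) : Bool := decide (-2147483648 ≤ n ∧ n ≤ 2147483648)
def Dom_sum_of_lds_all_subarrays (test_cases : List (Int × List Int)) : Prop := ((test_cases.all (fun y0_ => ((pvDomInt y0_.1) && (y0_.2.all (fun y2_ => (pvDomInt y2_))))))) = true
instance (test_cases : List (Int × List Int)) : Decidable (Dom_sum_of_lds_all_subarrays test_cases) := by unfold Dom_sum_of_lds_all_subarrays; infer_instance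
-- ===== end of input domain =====

-- B replaces A's closed-form per-descent weight (i+1)*(n-i-1) by a streaming double
-- prefix sum added once per right endpoint: a different decomposition, same O(n) cost.


-- ===== PORT A =====
def sum_of_lds_all_subarrays (test_cases : List (Int × List Int)) : List Int :=
  test_cases.foldl (fun results tc =>
    let n := tc.1
    let p := tc.2
    let total := PySem.Int.floordiv (n * (n + 1)) 2
    let ans := (PySem.List.pyRange 0 (n - 1) 1).foldl (fun ans i =>
      if PySem.List.pyGetD p i 0 > PySem.List.pyGetD p (i + 1) 0 then
        ans + (i + 1) * (n - i - 1)
      else ans) total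
    results ++ [ans]) []

-- ===== PORT B =====
def sum_of_lds_all_subarrays_alt (test_cases : List (Int × List Int)) : List Int :=
  test_cases.foldl (fun results tc =>
    let n := tc.1
    let p := tc.2
    let st := (PySem.List.pyRange 1 n 1).foldl (fun (s : Int × Int) r =>
      let acc := if PySem.List.pyGetD p (r - 1) 0 > PySem.List.pyGetD p r 0 then s.2 + r else s.2
      (s.1 + acc, acc)) (PySem.Int.floordiv (n * (n + 1)) 2, 0)
    results ++ [st.1]) []

-- ===== PRECONDITION & SPEC =====
-- Pre_ excludes exactly the inputs where the Python A raises IndexError: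
-- a test case with n ≥ 2 whose list p is shorter than n.
def Pre_sum_of_lds_all_subarrays (test_cases : List (Int × List Int)) : Prop :=
  ∀ tc ∈ test_cases, tc.1 ≤ 1 ∨ tc.1 ≤ tc.2.length
instance (test_cases : List (Int × List Int)) : Decidable (Pre_sum_of_lds_all_subarrays test_cases) := by unfold Pre_sum_of_lds_all_subarrays; infer_instance
def pvWitness_sum_of_lds_all_subarrays : (List (Int × List Int)) := [(3, [3, 1, 2]), (2, [1, 2])]
def Spec_sum_of_lds_all_subarrays (test_cases : List (Int × List Int)) (out : List Int) : Prop := out = sum_of_lds_all_subarrays_alt test_cases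
instance (test_cases : List (Int × List Int)) (out : List Int) : Decidable (Spec_sum_of_lds_all_subarrays test_cases out) := by unfold Spec_sum_of_lds_all_subarrays; infer_instance

-- ===== CLAIM (what is proved, stated in full; the proofs are below) =====
def Claim_equal_sum_of_lds_all_subarrays : Prop := ∀ (test_cases : List (Int × List Int)), Dom_sum_of_lds_all_subarrays test_cases → Pre_sum_of_lds_all_subarrays test_cases → Spec_sum_of_lds_all_subarrays test_cases (sum_of_lds_all_subarrays test_cases)

-- ===== LEMMAS AND PROOFS =====

-- A's inner loop is init plus the sum of its guarded increments.
theorem pvFoldlIte {β : Type} (c : β → Prop) [DecidablePred c] (w : β → Int) :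
    ∀ (l : List β) (init : Int),
      l.foldl (fun a i => if c i then a + w i else a) init
        = init + (l.map (fun i => if c i then w i else 0)).sum := by
  intro l
  induction l with
  | nil => intro init; simp
  | cons x t ih =>
    intro init
    simp only [List.foldl_cons, List.map_cons, List.sum_cons, ih]
    by_cases h : c x
    · rw [if_pos h, if_pos h]; ring
    · rw [if_neg h, if_neg h]; ring

-- Sums over List.range and Finset.range coincide definitionally.
theorem pvSumRange (n : ℕ) (f : ℕ → Int) :
    ((List.range n).map f).sum = ∑ k ∈ Finset.range n, f k := rfl

-- Characterisation of B's pair fold over range(1, 1+j).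
theorem pvFoldlB (p : List Int) :
    ∀ (j : ℕ) (a : Int),
      (PySem.List.pyRange 1 (1 + (j : Int)) 1).foldl (fun (s : Int × Int) r =>
        let acc := if PySem.List.pyGetD p (r - 1) 0 > PySem.List.pyGetD p r 0 then s.2 + r else s.2
        (s.1 + acc, acc)) (a, 0)
        = (a + ∑ r ∈ Finset.range j, ∑ k ∈ Finset.range (r + 1),
              (if PySem.List.pyGetD p (k : Int) 0 > PySem.List.pyGetD p ((k : Int) + 1) 0 then (k : Int) + 1 else 0),
           ∑ k ∈ Finset.range j,
              (if PySem.List.pyGetD p (k : Int) 0 > PySem.List.pyGetD p ((k : Int) + 1) 0 then (k : Int) + 1 else 0)) := by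
  intro j
  induction j with
  | zero => intro a; simp [PySem.List.pyRange_one_eq_nil]
  | succ j ih =>
    intro a
    have hsplit : PySem.List.pyRange 1 (1 + ((j + 1 : ℕ) : Int)) 1
        = PySem.List.pyRange 1 (1 + (j : Int)) 1 ++ [1 + (j : Int)] := by
      have := PySem.List.pyRange_one_succ_right (a := 1) (b := 1 + (j : Int)) (by omega)
      push_cast
      rw [show (1 : Int) + ((j : Int) + 1) = (1 + (j : Int)) + 1 by ring, this]
    rw [hsplit, List.foldl_append, ih]
    simp only [List.foldl_cons, List.foldl_nil]
    rw [show (1 : Int) + (j : Int) - 1 = (j : Int) by ring,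
        show (1 : Int) + (j : Int) = (j : Int) + 1 by ring]
    simp only [Finset.sum_range_succ]
    by_cases h : PySem.List.pyGetD p (j : Int) 0 > PySem.List.pyGetD p ((j : Int) + 1) 0
    · rw [if_pos h, if_pos h, Prod.mk.injEq]
      constructor <;> ring
    · rw [if_neg h, if_neg h, Prod.mk.injEq]
      constructor <;> ring

-- The double prefix sum counts each descent once per right endpoint to its right.
theorem pvSwapSum (E : ℕ → Int) :
    ∀ (m : ℕ),
      (∑ r ∈ Finset.range m, ∑ k ∈ Finset.range (r + 1), E k)
        = ∑ k ∈ Finset.range m, ((m : ℕ) - (k : ℕ) : ℤ) * E k := by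
  intro m
  induction m with
  | zero => simp
  | succ m ih =>
    rw [Finset.sum_range_succ, ih, Finset.sum_range_succ]
    rw [Finset.sum_range_succ (f := fun k => (((m + 1 : ℕ) : Int) - (k : Int)) * E k)]
    have : ∑ k ∈ Finset.range m, (((m + 1 : ℕ) : Int) - (k : Int)) * E k
        = ∑ k ∈ Finset.range m, (((m : Int) - (k : Int)) * E k + E k) := by
      apply Finset.sum_congr rfl
      intro k _
      push_cast
      ring
    rw [this, Finset.sum_add_distrib]
    push_cast
    ring

-- Per test case, the two inner computations agree.
theorem pvCaseEq (n : Int) (p : List Int) :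
    (PySem.List.pyRange 0 (n - 1) 1).foldl (fun ans i =>
        if PySem.List.pyGetD p i 0 > PySem.List.pyGetD p (i + 1) 0 then
          ans + (i + 1) * (n - i - 1)
        else ans) (PySem.Int.floordiv (n * (n + 1)) 2)
      = ((PySem.List.pyRange 1 n 1).foldl (fun (s : Int × Int) r =>
          let acc := if PySem.List.pyGetD p (r - 1) 0 > PySem.List.pyGetD p r 0 then s.2 + r else s.2
          (s.1 + acc, acc)) (PySem.Int.floordiv (n * (n + 1)) 2, 0)).1 := by
  by_cases hn : n ≤ 1
  · rw [PySem.List.pyRange_one_eq_nil (by omega), PySem.List.pyRange_one_eq_nil (by omega)]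
    simp
  · -- n ≥ 2; write n = 1 + m with m := (n-1).toNat.
    set m : ℕ := (n - 1).toNat with hm
    have hnm : n = 1 + (m : Int) := by omega
    rw [hnm, show (1 : Int) + (m : Int) - 1 = (m : Int) by ring, pvFoldlB p m]
    rw [pvSwapSum (fun k => if PySem.List.pyGetD p (k : Int) 0 > PySem.List.pyGetD p ((k : Int) + 1) 0 then (k : Int) + 1 else 0) m]
    -- A side: turn the fold into a Finset sum
    rw [PySem.List.pyRange_one (a := 0) (b := (m : Int)),
        show ((m : Int) - 0).toNat = m by omega, List.foldl_map]
    rw [pvFoldlIte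
      (fun y : ℕ => PySem.List.pyGetD p ((0 : Int) + (y : Int)) 0 > PySem.List.pyGetD p ((0 : Int) + (y : Int) + 1) 0)
      (fun y : ℕ => ((0 : Int) + (y : Int) + 1) * (1 + (m : Int) - ((0 : Int) + (y : Int)) - 1))
      (List.range m)]
    rw [pvSumRange]
    congr 1
    apply Finset.sum_congr rfl
    intro k _
    simp only [zero_add]
    by_cases hck : PySem.List.pyGetD p (k : Int) 0 > PySem.List.pyGetD p ((k : Int) + 1) 0
    · rw [if_pos hck, if_pos hck]
      have hk2 : (k : Int) ≤ (m : Int) := by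
        have := Finset.mem_range.mp ‹k ∈ Finset.range m›
        omega
      rw [show ((m : ℕ) - (k : ℕ) : ℤ) = (m : Int) - (k : Int) from by
        have : k ≤ m := by omega
        omega]
      ring
    · rw [if_neg hck, if_neg hck]
      ring

-- ===== VERDICT (by name: the statement is the Claim_ definition above) =====
theorem sum_of_lds_all_subarrays_spec : Claim_equal_sum_of_lds_all_subarrays := by
  intro test_cases _ hpre
  unfold Spec_sum_of_lds_all_subarrays sum_of_lds_all_subarrays sum_of_lds_all_subarrays_alt
  rw [PySem.List.foldl_append_singleton_eq_map, PySem.List.foldl_append_singleton_eq_map]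
  simp only [List.nil_append]
  apply List.map_congr_left
  intro tc htc
  exact pvCaseEq tc.1 tc.2
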